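-- pv_equiv track=rewrite | github.com/dzikriinzl/MILEA | core/callgraph/analyzer.py | _build_smali_adjacency
-- ===== SOURCE A (Python) =====
-- from collections import defaultdict
-- from typing import Any, Dict, List, Optional, Set, Tuple
--
-- def _build_smali_adjacency(
--
--     class_methods: Dict[str, Set[str]],
--     method_atoms: Dict[str, Set[str]],
-- ) -> Dict[str, Set[str]]:
--     """
--     Build a simulated CG adjacency: methods within the same class
--     are considered connected (1-hop). This is a conservative
--     approximation of call-graph reachability for smali analysis.
--     """
--     adjacency: Dict[str, Set[str]] = defaultdict(set)
--     for cls, methods in class_methods.items():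
--         method_list = list(methods)
--         for i, m1 in enumerate(method_list):
--             for m2 in method_list[i+1:]:
--                 adjacency[m1].add(m2)
--                 adjacency[m2].add(m1)
--     return adjacency
-- ===== SOURCE B (Python) =====
-- def _build_smali_adjacency(class_methods, method_atoms):
--     """Same simulated CG adjacency, built by a single per-method set-difference
--     pass per class instead of a triangular double loop with symmetric adds."""
--     adjacency = {}
--     for methods in class_methods.values():
--         for m in methods:
--             others = methods - {m}
--             if others:
--                 adjacency.setdefault(m, set()).update(others)
--     return adjacency
-- ===== Notes on version B (the rewrite author's own statement) =====
-- stated objective: simpler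
-- what changed: Replaces the triangular enumerate/slice double loop with its two symmetric adds per pair by a single pass per class that, for each method m, unions the set difference methods - {m} into adjacency[m] (guarded by 'if others:' so single-method classes create no entry).
import Mathlib
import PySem

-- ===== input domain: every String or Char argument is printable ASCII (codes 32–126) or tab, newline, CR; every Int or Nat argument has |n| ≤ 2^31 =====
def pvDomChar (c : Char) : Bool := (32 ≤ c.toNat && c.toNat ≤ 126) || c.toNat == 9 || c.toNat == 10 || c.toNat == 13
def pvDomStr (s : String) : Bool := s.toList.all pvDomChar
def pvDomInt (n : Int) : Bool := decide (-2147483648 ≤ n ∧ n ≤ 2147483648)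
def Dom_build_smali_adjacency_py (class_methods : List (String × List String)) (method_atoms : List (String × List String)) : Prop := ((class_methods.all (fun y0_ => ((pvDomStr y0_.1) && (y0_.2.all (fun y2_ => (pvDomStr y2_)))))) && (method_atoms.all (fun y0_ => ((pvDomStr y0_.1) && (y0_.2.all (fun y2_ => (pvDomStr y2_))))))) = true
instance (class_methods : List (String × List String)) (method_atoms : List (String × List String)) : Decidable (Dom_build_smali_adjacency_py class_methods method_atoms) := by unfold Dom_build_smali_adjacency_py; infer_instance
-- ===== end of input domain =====

-- B replaces A's triangular double loop (two symmetric adds per pair) by one per-method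
-- set-difference pass per class; objective: simpler. Equivalence of the RETURN value is proved.

-- ===== PORT A =====
-- literal port of A: defaultdict(set); 'adjacency[m].add(x)' is modify m [] (Set.add · x)
def build_smali_adjacency_py (class_methods : List (String × List String)) (method_atoms : List (String × List String)) : List (String × List String) :=
  let adjacency : PySem.Dict String (List String) :=
    class_methods.foldl (fun adjacency cm =>
      let method_list := cm.2            -- list(methods): the set's elements in order
      (PySem.List.enumerate method_list).foldl (fun adjacency im =>
        (PySem.List.slice method_list (some (im.1 + 1))).foldl (fun adjacency m2 =>
          let a1 := adjacency.modify im.2 [] (fun s => PySem.Set.add s m2)   -- adjacency[m1].add(m2)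
          a1.modify m2 [] (fun s => PySem.Set.add s im.2)                    -- adjacency[m2].add(m1)
        ) adjacency) adjacency) PySem.Dict.empty
  adjacency.items

-- ===== PORT B =====
-- literal port of Source B: per method m, others = methods - {m}; then setdefault(m, set()).update(others),
-- i.e. the entry (kept in place if present, appended if new) becomes Set.update of the old set
def build_smali_adjacency_py_alt (class_methods : List (String × List String)) (method_atoms : List (String × List String)) : List (String × List String) :=
  let adjacency : PySem.Dict String (List String) :=
    class_methods.foldl (fun adjacency cm =>
      cm.2.foldl (fun adjacency m =>
        let others := PySem.Set.diff cm.2 [m]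
        if others.isEmpty then adjacency
        else adjacency.insert m (PySem.Set.update (adjacency.getD m []) others)) adjacency) PySem.Dict.empty
  adjacency.items

-- ===== PRECONDITION & SPEC =====
-- Pre_ only states the representation invariant of the set-typed argument: each class's
-- method list holds DISTINCT elements (a Python set cannot contain duplicates, so every
-- real input satisfies it; a duplicated element would make A's port record a self-edge).
def Pre_build_smali_adjacency_py (class_methods : List (String × List String)) (method_atoms : List (String × List String)) : Prop :=
  ∀ p ∈ class_methods, p.2.Nodup
instance (class_methods : List (String × List String)) (method_atoms : List (String × List String)) : Decidable (Pre_build_smali_adjacency_py class_methods method_atoms) := by unfold Pre_build_smali_adjacency_py; infer_instance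
def pvWitness_build_smali_adjacency_py : (List (String × List String)) × (List (String × List String)) :=
  ([("C", ["a", "b", "c"]), ("D", ["x"])], [("a", ["b"])])
def Spec_build_smali_adjacency_py (class_methods : List (String × List String)) (method_atoms : List (String × List String)) (out : List (String × List String)) : Prop := out = build_smali_adjacency_py_alt class_methods method_atoms
instance (class_methods : List (String × List String)) (method_atoms : List (String × List String)) (out : List (String × List String)) : Decidable (Spec_build_smali_adjacency_py class_methods method_atoms out) := by unfold Spec_build_smali_adjacency_py; infer_instance

-- ===== CLAIM (what is proved, stated in full; the proofs are below) =====
def Claim_equal_build_smali_adjacency_py : Prop := ∀ (class_methods : List (String × List String)) (method_atoms : List (String × List String)), Dom_build_smali_adjacency_py class_methods method_atoms → Pre_build_smali_adjacency_py class_methods method_atoms → Spec_build_smali_adjacency_py class_methods method_atoms (build_smali_adjacency_py class_methods method_atoms)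

-- ===== LEMMAS AND PROOFS =====

abbrev Dct := PySem.Dict String (List String)

def pvDadd (d : Dct) (k v : String) : Dct := d.modify k [] (fun s => PySem.Set.add s v)

def pvApply (d : Dct) (L : List (String × String)) : Dct := L.foldl (fun d p => pvDadd d p.1 p.2) d

def pvVals (L : List (String × String)) (k : String) : List String :=
  (L.filter (fun p => p.1 == k)).map (·.2)

def pvNewK : List (String × String) → List String → List String
  | [], _ => []
  | p :: t, s => if p.1 ∈ s then pvNewK t s else p.1 :: pvNewK t (p.1 :: s)

def pvOpsA : List String → List (String × String)
  | [] => []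
  | m0 :: rest => rest.flatMap (fun m2 => [(m0, m2), (m2, m0)]) ++ pvOpsA rest

def pvOpsB (ms : List String) : List (String × String) :=
  ms.flatMap (fun m => (PySem.Set.diff ms [m]).map (fun x => (m, x)))

theorem pvApply_append (d : Dct) (l1 l2 : List (String × String)) :
    pvApply d (l1 ++ l2) = pvApply (pvApply d l1) l2 := List.foldl_append

theorem pvApply_flatMap {β : Type} (f : β → List (String × String)) :
    ∀ (ms : List β) (d : Dct), ms.foldl (fun a m => pvApply a (f m)) d = pvApply d (ms.flatMap f)
  | [], d => rfl
  | m :: t, d => by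
      simp only [List.foldl_cons, List.flatMap_cons, pvApply_append]
      exact pvApply_flatMap f t (pvApply d (f m))

theorem pvVals_append (l1 l2 : List (String × String)) (k : String) :
    pvVals (l1 ++ l2) k = pvVals l1 k ++ pvVals l2 k := by
  simp [pvVals, List.filter_append]

theorem pvNewK_congr : ∀ (l : List (String × String)) {s s' : List String},
    (∀ x, x ∈ s ↔ x ∈ s') → pvNewK l s = pvNewK l s'
  | [], _, _, _ => rfl
  | p :: t, s, s', h => by
      simp only [pvNewK]
      by_cases hp : p.1 ∈ s
      · rw [if_pos hp, if_pos ((h p.1).1 hp)]; exact pvNewK_congr t h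
      · rw [if_neg hp, if_neg (fun hc => hp ((h p.1).2 hc))]
        exact congrArg _ (pvNewK_congr t (by intro x; simp [List.mem_cons, h x]))

theorem mem_pvNewK : ∀ {l : List (String × String)} {s : List String} {x : String},
    x ∈ pvNewK l s → x ∉ s
  | [], _, _, h => by simp [pvNewK] at h
  | p :: t, s, x, h => by
      simp only [pvNewK] at h
      by_cases hp : p.1 ∈ s
      · rw [if_pos hp] at h; exact mem_pvNewK h
      · rw [if_neg hp] at h
        rcases List.mem_cons.1 h with rfl | h
        · exact hp
        · exact fun hs => mem_pvNewK h (List.mem_cons_of_mem _ hs)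

theorem pvNewK_nil_of_subset : ∀ {l : List (String × String)} {s : List String},
    (∀ p ∈ l, p.1 ∈ s) → pvNewK l s = []
  | [], _, _ => rfl
  | p :: t, s, h => by
      simp only [pvNewK, if_pos (h p (List.mem_cons_self))]
      exact pvNewK_nil_of_subset (fun q hq => h q (List.mem_cons_of_mem _ hq))

theorem pvNewK_append : ∀ (l1 l2 : List (String × String)) (s : List String),
    pvNewK (l1 ++ l2) s = pvNewK l1 s ++ pvNewK l2 (l1.map (·.1) ++ s)
  | [], l2, s => rfl
  | p :: t, l2, s => by
      simp only [List.cons_append, pvNewK, List.map_cons]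
      by_cases hp : p.1 ∈ s
      · rw [if_pos hp, if_pos hp, pvNewK_append t l2 s]
        refine congrArg _ (pvNewK_congr l2 ?_)
        intro x; simp only [List.mem_append, List.mem_cons]
        constructor
        · tauto
        · rintro (rfl | h); exacts [Or.inr hp, h]
      · rw [if_neg hp, if_neg hp, pvNewK_append t l2 (p.1 :: s)]
        simp only [List.cons_append]
        refine congrArg _ (congrArg _ (pvNewK_congr l2 ?_))
        intro x; simp only [List.mem_append, List.mem_cons]; tauto

theorem pvVals_cons_self (k v : String) (t : List (String × String)) :
    pvVals ((k, v) :: t) k = v :: pvVals t k := by simp [pvVals]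

theorem pvVals_cons_ne {k k' : String} (v : String) (t : List (String × String)) (h : k' ≠ k) :
    pvVals ((k, v) :: t) k' = pvVals t k' := by
  simp [pvVals, beq_iff_eq, Ne.symm h]

theorem pvUpdate_cons (s : List String) (v : String) (t : List String) :
    PySem.Set.update s (v :: t) = PySem.Set.update (PySem.Set.add s v) t := rfl

theorem pvApply_char : ∀ (L : List (String × String)) (d : Dct), d.keys.Nodup →
    pvApply d L = PySem.Dict.mk
      (d.items.map (fun q => (q.1, PySem.Set.update q.2 (pvVals L q.1))) ++
       (pvNewK L d.keys).map (fun k => (k, PySem.Set.update [] (pvVals L k))))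
  | [], d, _ => by
      cases d with
      | mk items => simp [pvApply, pvVals, pvNewK, PySem.Set.update]
  | (k, v) :: t, d, hnd => by
      have hstep : pvApply d ((k, v) :: t) = pvApply (d.insert k (PySem.Set.add (d.getD k []) v)) t := rfl
      rw [hstep, pvApply_char t _ (PySem.Dict.nodup_keys_insert d k _ hnd)]
      by_cases hc : d.contains k = true
      · have hk : k ∈ d.keys := (PySem.Dict.contains_iff_mem_keys d k).1 hc
        rw [PySem.Dict.items_insert_of_contains d _ hc, PySem.Dict.keys_insert_of_contains d _ hc]
        refine congrArg PySem.Dict.mk ?_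
        refine congrArg₂ (· ++ ·) ?_ ?_
        · rw [List.map_map]
          refine List.map_congr_left (fun q hq => ?_)
          by_cases hqk : q.1 = k
          · have hq2 : d.getD k [] = q.2 := by
              refine PySem.Dict.getD_of_mem_items d ?_ hnd []
              rw [← hqk]; exact hq
            simp only [Function.comp_apply, hqk, beq_self_eq_true, if_pos, ← hq2,
              pvVals_cons_self, pvUpdate_cons]
          · have hbeq : (q.1 == k) = false := beq_eq_false_iff_ne.2 hqk
            simp only [Function.comp_apply, hbeq, Bool.false_eq_true, if_false,
              pvVals_cons_ne v t hqk]
        · have hnew : pvNewK ((k, v) :: t) d.keys = pvNewK t d.keys := by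
            simp only [pvNewK, if_pos hk]
          rw [hnew]
          refine List.map_congr_left (fun k' hk' => ?_)
          have : k' ≠ k := fun h => (mem_pvNewK hk') (h ▸ hk)
          rw [pvVals_cons_ne v t this]
      · have hcf : d.contains k = false := by simpa using hc
        have hk : k ∉ d.keys := fun h => by
          rw [(PySem.Dict.contains_iff_mem_keys d k).2 h] at hcf; cases hcf
        rw [PySem.Dict.getD_of_not_contains d [] hcf,
          PySem.Dict.items_insert_of_not_contains d _ hcf,
          PySem.Dict.keys_insert_of_not_contains d _ hcf]
        have hnewcong : pvNewK t (d.keys ++ [k]) = pvNewK t (k :: d.keys) :=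
          pvNewK_congr t (by intro x; simp [List.mem_append, List.mem_cons, or_comm])
        have hnew : pvNewK ((k, v) :: t) d.keys = k :: pvNewK t (k :: d.keys) := by
          simp only [pvNewK, if_neg hk]
        rw [hnewcong, hnew, List.map_append, List.map_cons, List.append_assoc]
        refine congrArg PySem.Dict.mk (congrArg₂ (· ++ ·) ?_ ?_)
        · refine List.map_congr_left (fun q hq => ?_)
          have hqk : q.1 ≠ k := fun h =>
            hk (h ▸ List.mem_map_of_mem hq)
          rw [pvVals_cons_ne v t hqk]
        · simp only [List.map_cons]
          refine congrArg₂ (· :: ·) ?_ ?_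
          · rw [pvVals_cons_self, pvUpdate_cons]
          · refine List.map_congr_left (fun k' hk' => ?_)
            have : k' ≠ k := fun h => (mem_pvNewK hk') (h ▸ List.mem_cons_self)
            rw [pvVals_cons_ne v t this]

theorem pvApply_congr (L1 L2 : List (String × String))
    (hv : ∀ k, pvVals L1 k = pvVals L2 k) (hk : ∀ s, pvNewK L1 s = pvNewK L2 s)
    (d : Dct) (hnd : d.keys.Nodup) : pvApply d L1 = pvApply d L2 := by
  rw [pvApply_char L1 d hnd, pvApply_char L2 d hnd]
  simp only [hv, hk]

theorem pvDiff_eq_filter (ms : List String) (k : String) :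
    PySem.Set.diff ms [k] = ms.filter (fun x => !(x == k)) := by
  show List.filter _ ms = _
  apply List.filter_congr
  intro x _
  simp only [PySem.Set.contains_eq_listContains, List.contains_cons, List.contains_nil,
    Bool.or_false]

theorem pvVals_block (l : List String) (m k : String) :
    pvVals (l.map (fun x => (m, x))) k = if m = k then l else [] := by
  by_cases h : m = k <;> simp [pvVals, List.filter_map, Function.comp, h]

theorem pvValsB_gen (ms : List String) : ∀ (ms' : List String), ms'.Nodup → ∀ k,
    pvVals (ms'.flatMap (fun m => (PySem.Set.diff ms [m]).map (fun x => (m, x)))) k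
      = if k ∈ ms' then PySem.Set.diff ms [k] else []
  | [], _, k => by simp [pvVals]
  | m :: t, hnd, k => by
      simp only [List.flatMap_cons, pvVals_append, pvVals_block]
      rcases List.nodup_cons.1 hnd with ⟨hm, hndt⟩
      rw [pvValsB_gen ms t hndt k]
      by_cases h : m = k
      · subst h
        rw [if_pos rfl, if_pos (List.mem_cons_self), if_neg hm, List.append_nil]
      · rw [if_neg h, List.nil_append]
        by_cases hk : k ∈ t
        · rw [if_pos hk, if_pos (List.mem_cons_of_mem _ hk)]
        · rw [if_neg hk, if_neg (by simp [Ne.symm h, hk])]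

theorem pvValsB (ms : List String) (hnd : ms.Nodup) (k : String) :
    pvVals (pvOpsB ms) k = if k ∈ ms then PySem.Set.diff ms [k] else [] :=
  pvValsB_gen ms ms hnd k

theorem pvPair_vals_ne {m0 k : String} (r : String) (h : m0 ≠ k) :
    pvVals [(m0, r), (r, m0)] k = if r = k then [m0] else [] := by
  by_cases hrk : r = k
  · subst hrk
    simp [pvVals, beq_iff_eq, h]
  · simp [pvVals, beq_iff_eq, h, hrk]

theorem pvPass0_vals_ne (m0 k : String) (h : m0 ≠ k) : ∀ (rest : List String), rest.Nodup →
    pvVals (rest.flatMap (fun m2 => [(m0, m2), (m2, m0)])) k = if k ∈ rest then [m0] else []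
  | [], _ => by simp [pvVals]
  | r :: t, hnd => by
      rcases List.nodup_cons.1 hnd with ⟨hr, hndt⟩
      rw [List.flatMap_cons,
        show ((m0, r) :: (r, m0) :: [] ++ t.flatMap (fun m2 => [(m0, m2), (m2, m0)]))
          = [(m0, r), (r, m0)] ++ t.flatMap (fun m2 => [(m0, m2), (m2, m0)]) from rfl,
        pvVals_append, pvPair_vals_ne r h, pvPass0_vals_ne m0 k h t hndt]
      by_cases hrk : r = k
      · subst hrk
        rw [if_pos rfl, if_neg hr, if_pos (List.mem_cons_self), List.append_nil]
      · rw [if_neg hrk, List.nil_append]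
        by_cases hk : k ∈ t
        · rw [if_pos hk, if_pos (List.mem_cons_of_mem _ hk)]
        · rw [if_neg hk, if_neg (by simp [Ne.symm hrk, hk])]

theorem pvPass0_vals_self (m0 : String) : ∀ (rest : List String), m0 ∉ rest →
    pvVals (rest.flatMap (fun m2 => [(m0, m2), (m2, m0)])) m0 = rest
  | [], _ => by simp [pvVals]
  | r :: t, hm => by
      have hr : r ≠ m0 := fun h => hm (h ▸ List.mem_cons_self)
      have hblock : pvVals [(m0, r), (r, m0)] m0 = [r] := by
        simp [pvVals, beq_iff_eq, hr]
      rw [List.flatMap_cons,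
        show ((m0, r) :: (r, m0) :: [] ++ t.flatMap (fun m2 => [(m0, m2), (m2, m0)]))
          = [(m0, r), (r, m0)] ++ t.flatMap (fun m2 => [(m0, m2), (m2, m0)]) from rfl,
        pvVals_append, hblock, pvPass0_vals_self m0 t (fun h => hm (List.mem_cons_of_mem _ h))]
      rfl

theorem pvValsA : ∀ (ms : List String), ms.Nodup → ∀ k,
    pvVals (pvOpsA ms) k = if k ∈ ms then PySem.Set.diff ms [k] else []
  | [], _, k => by simp [pvOpsA, pvVals]
  | m0 :: rest, hnd, k => by
      rcases List.nodup_cons.1 hnd with ⟨hm, hndt⟩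
      simp only [pvOpsA, pvVals_append]
      rw [pvValsA rest hndt k]
      by_cases h : m0 = k
      · subst h
        rw [pvPass0_vals_self m0 rest hm, if_neg hm, if_pos (List.mem_cons_self),
          List.append_nil, pvDiff_eq_filter]
        simp only [List.filter_cons, beq_self_eq_true, Bool.not_true, Bool.false_eq_true,
          if_false]
        exact (List.filter_eq_self.2 (fun x hx => by
          have hxm : x ≠ m0 := fun hxm => hm (hxm ▸ hx)
          simp [hxm])).symm
      · rw [pvPass0_vals_ne m0 k h rest hndt]
        by_cases hk : k ∈ rest
        · rw [if_pos hk, if_pos hk, if_pos (List.mem_cons_of_mem _ hk), pvDiff_eq_filter,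
            pvDiff_eq_filter, List.filter_cons, if_pos (by simp [h] : (!(m0 == k)) = true)]
          rfl
        · rw [if_neg hk, if_neg hk, if_neg (by simp [Ne.symm h, hk])]
          rfl

theorem pvNewK_const (m : String) : ∀ (l : List String) (s : List String), l ≠ [] →
    pvNewK (l.map (fun x => (m, x))) s = if m ∈ s then [] else [m]
  | [], _, h => absurd rfl h
  | x :: t, s, _ => by
      simp only [List.map_cons, pvNewK]
      by_cases hm : m ∈ s
      · rw [if_pos hm, if_pos hm, pvNewK_nil_of_subset]
        intro p hp
        rcases List.mem_map.1 hp with ⟨y, _, rfl⟩; exact hm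
      · rw [if_neg hm, if_neg hm, pvNewK_nil_of_subset]
        intro p hp
        rcases List.mem_map.1 hp with ⟨y, _, rfl⟩; exact List.mem_cons_self

theorem pvDiff_ne_nil {ms : List String} (hnd : ms.Nodup) (hlen : 2 ≤ ms.length) (m : String) :
    PySem.Set.diff ms [m] ≠ [] := by
  match ms, hnd, hlen with
  | a :: b :: t, hnd, _ =>
    have hab : a ≠ b := by
      rcases List.nodup_cons.1 hnd with ⟨ha, _⟩
      exact fun h => ha (h ▸ List.mem_cons_self)
    rw [pvDiff_eq_filter]
    rcases eq_or_ne a m with rfl | ham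
    · exact List.ne_nil_of_mem (List.mem_filter.2
        ⟨List.mem_cons_of_mem _ List.mem_cons_self, by simp [Ne.symm hab]⟩)
    · exact List.ne_nil_of_mem (List.mem_filter.2 ⟨List.mem_cons_self, by simp [ham]⟩)

theorem pvNewKB_gen (ms : List String) : ∀ (ms' : List String), ms'.Nodup →
    (∀ m ∈ ms', PySem.Set.diff ms [m] ≠ []) → ∀ s,
    pvNewK (ms'.flatMap (fun m => (PySem.Set.diff ms [m]).map (fun x => (m, x)))) s
      = ms'.filter (fun m => decide (m ∉ s))
  | [], _, _, s => rfl
  | m :: t, hnd, hne, s => by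
      rcases List.nodup_cons.1 hnd with ⟨hm, hndt⟩
      rw [List.flatMap_cons, pvNewK_append, pvNewK_const m _ s (hne m List.mem_cons_self)]
      obtain ⟨y, hy⟩ := List.exists_mem_of_ne_nil _ (hne m List.mem_cons_self)
      have hseen : ∀ x, x ∈ ((PySem.Set.diff ms [m]).map (fun x => (m, x))).map (·.1) ++ s
          ↔ x ∈ m :: s := by
        intro x
        simp only [List.map_map, List.mem_append, List.mem_map, Function.comp, List.mem_cons]
        constructor
        · rintro (⟨z, _, rfl⟩ | hx)
          · exact Or.inl rfl
          · exact Or.inr hx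
        · rintro (rfl | hx)
          · exact Or.inl ⟨y, hy, rfl⟩
          · exact Or.inr hx
      rw [pvNewK_congr _ hseen,
        pvNewKB_gen ms t hndt (fun a ha => hne a (List.mem_cons_of_mem _ ha)) (m :: s)]
      have hfc : t.filter (fun a => decide (a ∉ m :: s)) = t.filter (fun a => decide (a ∉ s)) := by
        refine List.filter_congr (fun x hx => ?_)
        have : x ≠ m := fun h => hm (h ▸ hx)
        simp [List.mem_cons, this]
      rw [hfc, List.filter_cons]
      by_cases hms : m ∈ s
      · simp [hms]
      · simp [hms]

theorem pvMem_opsA_fst : ∀ {ms : List String} {p : String × String}, p ∈ pvOpsA ms → p.1 ∈ ms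
  | [], p, h => absurd h (by simp [pvOpsA])
  | m0 :: rest, p, h => by
      simp only [pvOpsA, List.mem_append, List.mem_flatMap] at h
      rcases h with ⟨a, ha, hp⟩ | h
      · rcases List.mem_cons.1 hp with rfl | hp
        · exact List.mem_cons_self
        · rcases List.mem_cons.1 hp with rfl | hp
          · exact List.mem_cons_of_mem _ ha
          · simp at hp
      · exact List.mem_cons_of_mem _ (pvMem_opsA_fst h)

theorem pvPair_newK {m0 r : String} (h : r ≠ m0) (s : List String) :
    pvNewK [(m0, r), (r, m0)] s = [m0, r].filter (fun x => decide (x ∉ s)) := by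
  by_cases h0 : m0 ∈ s <;> by_cases h1 : r ∈ s <;>
    simp [pvNewK, h0, h1, List.mem_cons, h]

theorem pvPass0_newK (m0 : String) : ∀ (rest : List String), m0 ∉ rest → rest.Nodup →
    rest ≠ [] → ∀ s,
    pvNewK (rest.flatMap (fun m2 => [(m0, m2), (m2, m0)])) s
      = (m0 :: rest).filter (fun x => decide (x ∉ s))
  | [], _, _, h, _ => absurd rfl h
  | [r], hm, _, _, s => by
      have hr : r ≠ m0 := fun h => hm (h ▸ List.mem_cons_self)
      simp only [List.flatMap_cons, List.flatMap_nil, List.append_nil]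
      exact pvPair_newK hr s
  | r :: r' :: t, hm, hnd, _, s => by
      have hr : r ≠ m0 := fun h => hm (h ▸ List.mem_cons_self)
      rcases List.nodup_cons.1 hnd with ⟨hrt, hndt⟩
      rw [List.flatMap_cons,
        show ((m0, r) :: (r, m0) :: [] ++ (r' :: t).flatMap (fun m2 => [(m0, m2), (m2, m0)]))
          = [(m0, r), (r, m0)] ++ (r' :: t).flatMap (fun m2 => [(m0, m2), (m2, m0)]) from rfl,
        pvNewK_append, pvPair_newK hr s]
      rw [show (List.map (·.1) [(m0, r), (r, m0)] ++ s) = [m0, r] ++ s from rfl]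
      rw [pvPass0_newK m0 (r' :: t) (fun h => hm (List.mem_cons_of_mem _ h)) hndt
        (List.cons_ne_nil _ _) ([m0, r] ++ s)]
      have : (r' :: t).filter (fun x => decide (x ∉ [m0, r] ++ s))
          = (r' :: t).filter (fun x => decide (x ∉ s)) := by
        refine List.filter_congr (fun x hx => ?_)
        have hx0 : x ≠ m0 := fun h => hm (h ▸ List.mem_cons_of_mem _ hx)
        have hx1 : x ≠ r := fun h => hrt (h ▸ hx)
        simp [List.mem_cons, hx0, hx1]
      have hB : (m0 :: r' :: t).filter (fun x => decide (x ∉ [m0, r] ++ s))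
          = (r' :: t).filter (fun x => decide (x ∉ s)) := by
        rw [List.filter_cons, if_neg (by simp)]
        exact this
      rw [hB, show (m0 :: r :: r' :: t) = [m0, r] ++ (r' :: t) from rfl, List.filter_append]

theorem pvNewK_AB : ∀ (ms : List String), ms.Nodup → ∀ (s : List String),
    pvNewK (pvOpsA ms) s = pvNewK (pvOpsB ms) s
  | [], _, s => rfl
  | [m], _, s => by
      have hA : pvOpsA [m] = [] := by simp [pvOpsA]
      have hB : pvOpsB [m] = [] := by simp [pvOpsB, pvDiff_eq_filter]
      rw [hA, hB]
  | m0 :: r :: t, hnd, s => by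
      rcases List.nodup_cons.1 hnd with ⟨hm, hndt⟩
      have h2 : 2 ≤ (m0 :: r :: t).length := by simp
      have hsub : ∀ p ∈ pvOpsA (r :: t),
          p.1 ∈ ((r :: t).flatMap (fun m2 => [(m0, m2), (m2, m0)])).map (·.1) ++ s := by
        intro p hp
        refine List.mem_append_left _ (List.mem_map.2 ⟨(p.1, m0), ?_, rfl⟩)
        exact List.mem_flatMap.2 ⟨p.1, pvMem_opsA_fst hp, by simp⟩
      rw [show pvOpsA (m0 :: r :: t)
            = (r :: t).flatMap (fun m2 => [(m0, m2), (m2, m0)]) ++ pvOpsA (r :: t) from rfl,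
        pvNewK_append, pvPass0_newK m0 (r :: t) hm hndt (List.cons_ne_nil _ _) s,
        pvNewK_nil_of_subset hsub, List.append_nil]
      rw [show pvOpsB (m0 :: r :: t)
            = (m0 :: r :: t).flatMap
                (fun m => (PySem.Set.diff (m0 :: r :: t) [m]).map (fun x => (m, x))) from rfl,
        pvNewKB_gen (m0 :: r :: t) (m0 :: r :: t) hnd
          (fun m _ => pvDiff_ne_nil hnd h2 m) s]

def pvInnerA (ms : List String) (d : Dct) : Dct :=
  (PySem.List.enumerate ms).foldl (fun adjacency im =>
    (PySem.List.slice ms (some (im.1 + 1))).foldl (fun adjacency m2 =>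
      (adjacency.modify im.2 [] (fun s => PySem.Set.add s m2)).modify m2 []
        (fun s => PySem.Set.add s im.2)) adjacency) d

def pvInnerB (ms : List String) (d : Dct) : Dct :=
  ms.foldl (fun adjacency m =>
    let others := PySem.Set.diff ms [m]
    if others.isEmpty then adjacency
    else adjacency.insert m (PySem.Set.update (adjacency.getD m []) others)) d

theorem pvInnerA_go (ms : List String) : ∀ (rest : List String) (s : Int) (d : Dct), 0 ≤ s →
    List.drop s.toNat ms = rest →
    (PySem.List.enumerate rest s).foldl (fun adjacency im =>
      (PySem.List.slice ms (some (im.1 + 1))).foldl (fun adjacency m2 =>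
        (adjacency.modify im.2 [] (fun s => PySem.Set.add s m2)).modify m2 []
          (fun s => PySem.Set.add s im.2)) adjacency) d
      = pvApply d (pvOpsA rest)
  | [], s, d, hs, hdrop => by rw [PySem.List.enumerate_nil]; rfl
  | r :: rest', s, d, hs, hdrop => by
      have hs1 : (0:Int) ≤ s + 1 := by omega
      have htail : List.drop (s + 1).toNat ms = rest' := by
        have h1 := congrArg (List.drop 1) hdrop
        rw [List.drop_drop] at h1
        rw [show (s + 1).toNat = s.toNat + 1 from by omega]
        simpa using h1
      have hslice : PySem.List.slice ms (some (s + 1)) = rest' := by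
        rw [PySem.List.slice_from ms hs1, htail]
      simp only [PySem.List.enumerate_cons, List.foldl_cons]
      rw [hslice]
      rw [pvInnerA_go ms rest' (s + 1) _ hs1 htail]
      rw [show pvOpsA (r :: rest')
            = rest'.flatMap (fun m2 => [(r, m2), (m2, r)]) ++ pvOpsA rest' from rfl,
        pvApply_append]
      exact congrArg (fun x => pvApply x (pvOpsA rest'))
        (pvApply_flatMap (fun m2 => [(r, m2), (m2, r)]) rest' d)

theorem pvInnerA_eq (ms : List String) (d : Dct) : pvInnerA ms d = pvApply d (pvOpsA ms) :=
  pvInnerA_go ms ms 0 d le_rfl rfl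

theorem pvIns_update : ∀ (vs : List String), vs ≠ [] → ∀ (d : Dct) (m : String),
    d.insert m (PySem.Set.update (d.getD m []) vs) = pvApply d (vs.map (fun x => (m, x)))
  | [], h, _, _ => absurd rfl h
  | [v], _, d, m => rfl
  | v :: w :: t, _, d, m => by
      rw [show pvApply d ((v :: w :: t).map (fun x => (m, x)))
            = pvApply (pvDadd d m v) ((w :: t).map (fun x => (m, x))) from rfl,
        ← pvIns_update (w :: t) (List.cons_ne_nil _ _) (pvDadd d m v) m]
      have hg : (pvDadd d m v).getD m [] = PySem.Set.add (d.getD m []) v :=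
        PySem.Dict.getD_insert_self d m _ []
      rw [hg, show pvDadd d m v = d.insert m (PySem.Set.add (d.getD m []) v) from rfl,
        PySem.Dict.insert_insert_self]
      rfl

theorem pvInnerB_eq (ms : List String) (d : Dct) : pvInnerB ms d = pvApply d (pvOpsB ms) := by
  unfold pvInnerB pvOpsB
  rw [← pvApply_flatMap]
  have hf : (fun (adjacency : Dct) m =>
        let others := PySem.Set.diff ms [m]
        if others.isEmpty then adjacency
        else adjacency.insert m (PySem.Set.update (adjacency.getD m []) others))
      = (fun (a : Dct) m => pvApply a ((PySem.Set.diff ms [m]).map (fun x => (m, x)))) := by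
    funext a m
    rcases heq : PySem.Set.diff ms [m] with _ | ⟨v, t⟩
    · rfl
    · show (if (v :: t).isEmpty then a else a.insert m (PySem.Set.update (a.getD m []) (v :: t)))
          = pvApply a ((v :: t).map (fun x => (m, x)))
      rw [if_neg (by simp)]
      exact pvIns_update (v :: t) (List.cons_ne_nil _ _) a m
  rw [hf]

theorem pvApply_nodup : ∀ (L : List (String × String)) (d : Dct), d.keys.Nodup →
    (pvApply d L).keys.Nodup
  | [], _, h => h
  | p :: t, d, h => pvApply_nodup t _ (PySem.Dict.nodup_keys_insert d p.1 _ h)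

theorem pvInner_eq (ms : List String) (hnd : ms.Nodup) (d : Dct) (hd : d.keys.Nodup) :
    pvInnerA ms d = pvInnerB ms d := by
  rw [pvInnerA_eq, pvInnerB_eq]
  exact pvApply_congr _ _ (fun k => by rw [pvValsA ms hnd k, pvValsB ms hnd k])
    (pvNewK_AB ms hnd) d hd

theorem pvOuter : ∀ (cms : List (String × List String)) (d : Dct), d.keys.Nodup →
    (∀ p ∈ cms, p.2.Nodup) →
    cms.foldl (fun adj p => pvInnerA p.2 adj) d = cms.foldl (fun adj p => pvInnerB p.2 adj) d
  | [], _, _, _ => rfl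
  | p :: t, d, hd, h => by
      simp only [List.foldl_cons]
      rw [pvInner_eq p.2 (h p List.mem_cons_self) d hd]
      refine pvOuter t _ ?_ (fun q hq => h q (List.mem_cons_of_mem _ hq))
      rw [← pvInner_eq p.2 (h p List.mem_cons_self) d hd, pvInnerA_eq]
      exact pvApply_nodup _ d hd

theorem pvPorts_eq (class_methods : List (String × List String))
    (method_atoms : List (String × List String))
    (hpre : ∀ p ∈ class_methods, p.2.Nodup) :
    build_smali_adjacency_py class_methods method_atoms
      = build_smali_adjacency_py_alt class_methods method_atoms := by
  show (class_methods.foldl (fun adj p => pvInnerA p.2 adj) PySem.Dict.empty).items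
      = (class_methods.foldl (fun adj p => pvInnerB p.2 adj) PySem.Dict.empty).items
  rw [pvOuter class_methods PySem.Dict.empty PySem.Dict.nodup_keys_empty hpre]

-- ===== VERDICT (by name: the statement is the Claim_ definition above) =====
theorem build_smali_adjacency_py_spec : Claim_equal_build_smali_adjacency_py := by
  intro class_methods method_atoms _ hpre
  exact pvPorts_eq class_methods method_atoms hpre
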